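-- pv_equiv track=rewrite | github.com/yemingx/domain_expert | backend/literature_research/scripts/fetch_papers.py | _safe_wrap_query
-- ===== SOURCE A (Python) =====
-- def _safe_wrap_query(query: str, extra: str) -> str:
--     """在保留顶层 NOT 运算符语义的前提下追加 AND 条件。"""
--     inside_quote = False
--     last_not_pos = -1
--     i = 0
--     while i < len(query):
--         c = query[i]
--         if c == '"':
--             inside_quote = not inside_quote
--         elif not inside_quote and query[i : i + 5].upper() == " NOT ":
--             last_not_pos = i
--         i += 1
--     if last_not_pos > 0:
--         positive_part = query[:last_not_pos].strip()
--         negative_part = query[last_not_pos + 5 :].strip()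
--         return f"({positive_part}) AND ({extra}) NOT {negative_part}"
--     else:
--         return f"({query}) AND ({extra})"
-- ===== SOURCE B (Python) =====
-- def _safe_wrap_query(query: str, extra: str) -> str:
--     """Append AND condition preserving top-level NOT semantics (stateless rewrite).
--
--     Instead of a while-loop threading an inside_quote flag and overwriting
--     last_not_pos, collect every top-level " NOT " position with a single
--     comprehension (a position is top-level iff the prefix before it contains an
--     even number of '"'; str.count with a 1-char needle counts characters) and
--     take the last one.
--     """
--     hits = [
--         i
--         for i in range(len(query))
--         if query[:i].count('"') % 2 == 0 and query[i:i + 5].upper() == " NOT "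
--     ]
--     last_not_pos = hits[-1] if hits else -1
--     if last_not_pos > 0:
--         positive_part = query[:last_not_pos].strip()
--         negative_part = query[last_not_pos + 5:].strip()
--         return f"({positive_part}) AND ({extra}) NOT {negative_part}"
--     return f"({query}) AND ({extra})"
-- ===== Notes on version B (the rewrite author's own statement) =====
-- stated objective: simpler
-- what changed: Replaced the stateful while-loop threading an inside_quote flag and an overwritten last_not_pos by a stateless list comprehension (a position is top-level iff the prefix before it has an even quote count) followed by taking the last hit.
import Mathlib
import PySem

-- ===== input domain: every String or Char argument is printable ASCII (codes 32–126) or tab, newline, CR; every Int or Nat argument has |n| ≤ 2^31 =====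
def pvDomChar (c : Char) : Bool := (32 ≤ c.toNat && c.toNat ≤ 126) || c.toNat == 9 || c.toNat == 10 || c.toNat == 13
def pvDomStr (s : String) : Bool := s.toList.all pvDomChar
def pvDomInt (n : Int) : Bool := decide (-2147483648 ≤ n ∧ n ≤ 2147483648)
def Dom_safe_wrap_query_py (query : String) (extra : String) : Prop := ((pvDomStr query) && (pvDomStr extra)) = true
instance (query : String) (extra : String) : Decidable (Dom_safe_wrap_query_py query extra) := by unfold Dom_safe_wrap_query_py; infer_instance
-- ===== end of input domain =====

-- B replaces A's stateful while-loop (inside_quote flag + overwritten last_not_pos) by a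
-- stateless comprehension over positions plus last-element selection; objective: simpler.


-- ===== PORT A =====
-- shared primitive: both Pythons contain the literal test  query[i:i+5].upper() == " NOT "
def pvNotWindow (q : List Char) (i : Int) : Bool :=
  PySem.Chars.upper (PySem.List.slice q (some i) (some (i + 5))) == " NOT ".toList

-- shared tail: the final if/strip/format lines, textually identical in both Pythons
def pvWrapTail (q : List Char) (extra : String) (lastNotPos : Int) : String :=
  if lastNotPos > 0 then
    let positivePart := PySem.Chars.strip (PySem.List.slice q none (some lastNotPos))
    let negativePart := PySem.Chars.strip (PySem.List.slice q (some (lastNotPos + 5)) none)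
    String.ofList ("(".toList ++ positivePart ++ ") AND (".toList ++ extra.toList ++ ") NOT ".toList ++ negativePart)
  else
    String.ofList ("(".toList ++ q ++ ") AND (".toList ++ extra.toList ++ ")".toList)

-- A's loop body: toggle inside_quote on '"', else record a top-level " NOT " position
def pvStepA (q : List Char) (s : Bool × Int) (i : Int) : Bool × Int :=
  let c := PySem.List.pyGetD q i ' '
  if c == '"' then (!s.1, s.2)
  else if !s.1 && pvNotWindow q i then (s.1, i)
  else s

def safe_wrap_query_py (query : String) (extra : String) : String :=
  let q := query.toList
  let st := (PySem.List.pyRange 0 (q.length : Int) 1).foldl (pvStepA q) (false, -1)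
  pvWrapTail q extra st.2

-- ===== PORT B =====
-- B's comprehension filter: prefix holds an even number of '"' and the window matches
-- (str.count with a 1-character needle equals the per-character count, ported as List.count)
def pvTopLevelNot (q : List Char) (i : Int) : Bool :=
  ((PySem.List.slice q none (some i)).count '"' % 2 == 0) && pvNotWindow q i

def safe_wrap_query_py_alt (query : String) (extra : String) : String :=
  let q := query.toList
  let hits := (PySem.List.pyRange 0 (q.length : Int) 1).filter (pvTopLevelNot q)
  let lastNotPos := hits.getLast?.getD (-1)
  pvWrapTail q extra lastNotPos

-- ===== PRECONDITION & SPEC =====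
def Spec_safe_wrap_query_py (query : String) (extra : String) (out : String) : Prop := out = safe_wrap_query_py_alt query extra
instance (query : String) (extra : String) (out : String) : Decidable (Spec_safe_wrap_query_py query extra out) := by unfold Spec_safe_wrap_query_py; infer_instance

-- ===== CLAIM (what is proved, stated in full; the proofs are below) =====
def Claim_equal_safe_wrap_query_py : Prop := ∀ (query : String) (extra : String), Dom_safe_wrap_query_py query extra → Spec_safe_wrap_query_py query extra (safe_wrap_query_py query extra)

-- ===== LEMMAS AND PROOFS =====

-- the window cannot match when its first character is '"'
lemma pvNotWindow_quote (q : List Char) (n : Nat) (h : n < q.length) (hq : q[n] = '"') :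
    pvNotWindow q (n : Int) = false := by
  unfold pvNotWindow
  have h5 : ((n : Int) + 5) = ((n : Int) + ((5 : Nat) : Int)) := by norm_num
  rw [h5, PySem.List.slice_natCast_add]
  rw [List.drop_eq_getElem_cons h, hq]
  simp only [List.take_succ_cons, PySem.Chars.upper, List.map_cons]
  have hs : " NOT ".toList = ' ' :: ['N', 'O', 'T', ' '] := rfl
  rw [hs, List.cons_beq_cons]
  have h1 : (PySem.Chars.upperChar '"' == ' ') = false := by decide
  rw [h1, Bool.false_and]

-- loop invariant: the fold over the first n indices computes the prefix quote parity and
-- the last top-level match among them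
lemma pvLoop_eq (q : List Char) (n : Nat) (hn : n ≤ q.length) :
    (PySem.List.pyRange 0 (n : Int) 1).foldl (pvStepA q) (false, (-1 : Int)) =
      (((q.take n).count '"' % 2 == 1),
       (((PySem.List.pyRange 0 (n : Int) 1).filter (pvTopLevelNot q)).getLast?).getD (-1)) := by
  induction n with
  | zero => simp [PySem.List.pyRange_one_eq_nil]
  | succ m ih =>
    have hm : m ≤ q.length := Nat.le_of_succ_le hn
    have hlt : m < q.length := hn
    have hsplit : PySem.List.pyRange 0 ((m + 1 : Nat) : Int) 1
        = PySem.List.pyRange 0 (m : Nat) 1 ++ [(m : Int)] := by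
      push_cast
      exact PySem.List.pyRange_one_succ_right (by positivity)
    have hget : PySem.List.pyGetD q ((m : Nat) : Int) ' ' = q[m] := by
      rw [PySem.List.pyGetD_natCast, List.getD_eq_getElem q ' ' hlt]
    have hslice : PySem.List.slice q none (some ((m : Nat) : Int)) = q.take m :=
      PySem.List.slice_to_natCast q m
    have htake : q.take (m + 1) = q.take m ++ [q[m]] := by
      rw [List.take_add_one, List.getElem?_eq_getElem hlt]; rfl
    have hpar : ∀ c : Nat, (((c + 1) % 2 == 1) = !(c % 2 == 1)) := by
      intro c; rcases Nat.mod_two_eq_zero_or_one c with h | h <;> simp [Nat.add_mod, h]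
    have hnot : ∀ c : Nat, ((c % 2 == 0) = !(c % 2 == 1)) := by
      intro c; rcases Nat.mod_two_eq_zero_or_one c with h | h <;> simp [h]
    rw [hsplit, List.foldl_append, List.filter_append, ih hm]
    by_cases hc : q[m] = '"'
    · have hw : pvNotWindow q ((m : Nat) : Int) = false := pvNotWindow_quote q m hlt hc
      have hpred : pvTopLevelNot q ((m : Nat) : Int) = false := by
        unfold pvTopLevelNot; rw [hw, Bool.and_false]
      simp only [List.foldl_cons, List.foldl_nil, pvStepA, hget, hc, List.filter_cons,
        hpred, List.filter_nil]
      simp only [htake, List.count_append, hc, beq_self_eq_true, List.count_cons,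
        List.count_nil, if_true, hpar]
      simp
    · have hcb : (q[m] == '"') = false := by simp [hc]
      have hcount : (q.take (m + 1)).count '"' = (q.take m).count '"' := by
        rw [htake, List.count_append]
        simp [hc]
      simp only [List.foldl_cons, List.foldl_nil, pvStepA, hget, hcb, Bool.false_eq_true,
        if_false, List.filter_cons, List.filter_nil, pvTopLevelNot, hslice, hcount,
        hnot]
      by_cases hw : pvNotWindow q ((m : Nat) : Int) = true
      · simp only [hw, Bool.and_true]
        split_ifs <;> simp
      · simp [Bool.eq_false_iff.mpr hw]

-- ===== VERDICT (by name: the statement is the Claim_ definition above) =====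
theorem safe_wrap_query_py_spec : Claim_equal_safe_wrap_query_py := by
  intro query extra _
  unfold Spec_safe_wrap_query_py safe_wrap_query_py safe_wrap_query_py_alt
  simp only []
  rw [pvLoop_eq query.toList query.toList.length (le_refl _)]
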